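-- pv_equiv track=rewrite | github.com/mikejsmith1985/jira-automation | sync_engine.py | _get_branch_rule
-- ===== SOURCE A (Python) =====
-- def _get_branch_rule(merged_config, target_branch):
--     """Get the appropriate branch rule for merged PRs"""
--     branch_rules = merged_config.get('branch_rules', [])
--
--     # Try to find exact branch match
--     for rule in branch_rules:
--         if rule['branch'].upper() == target_branch:
--             return rule
--
--     # Fall back to default rule
--     for rule in branch_rules:
--         if rule['branch'] == 'default':
--             return rule
--
--     # If no rules defined, return empty
--     return {}
-- ===== SOURCE B (Python) =====
-- def _get_branch_rule(merged_config, target_branch):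
--     """Get the appropriate branch rule for merged PRs"""
--     default_rule = None
--     for rule in merged_config.get('branch_rules', []):
--         if rule['branch'].upper() == target_branch:
--             return rule
--         if default_rule is None and rule['branch'] == 'default':
--             default_rule = rule
--     return default_rule if default_rule is not None else {}
-- ===== Notes on version B (the rewrite author's own statement) =====
-- stated objective: simpler
-- what changed: Replaced A's two sequential scans (exact match, then default) by a single pass that remembers the first 'default' rule as a fallback while still giving exact matches priority.
import Mathlib
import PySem

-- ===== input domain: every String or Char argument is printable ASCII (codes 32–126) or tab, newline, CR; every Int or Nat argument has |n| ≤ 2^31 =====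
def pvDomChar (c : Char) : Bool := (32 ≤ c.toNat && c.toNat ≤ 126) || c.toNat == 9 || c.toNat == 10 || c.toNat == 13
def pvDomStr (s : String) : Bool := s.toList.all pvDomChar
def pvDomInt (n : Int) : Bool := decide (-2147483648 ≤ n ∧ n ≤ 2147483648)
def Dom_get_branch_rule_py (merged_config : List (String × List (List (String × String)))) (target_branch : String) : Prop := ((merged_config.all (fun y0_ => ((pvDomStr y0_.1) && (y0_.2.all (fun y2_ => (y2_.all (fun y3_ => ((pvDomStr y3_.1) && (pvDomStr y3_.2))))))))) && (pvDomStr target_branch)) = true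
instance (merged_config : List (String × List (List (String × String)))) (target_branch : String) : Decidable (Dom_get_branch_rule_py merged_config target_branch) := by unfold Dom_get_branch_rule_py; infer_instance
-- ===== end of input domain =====

-- B replaces A's two sequential scans by one pass that remembers the first 'default'
-- rule as a fallback (objective: simpler, same cost).

-- shared dict-access helper: first-match lookup in an association list (Python dict access)
def pvLookup {α : Type} (k : String) : List (String × α) → Option α
  | [] => none
  | (k', v) :: rest => if k' == k then some v else pvLookup k rest

-- ===== PORT A =====
-- first loop of A: find exact branch match (rule['branch'].upper() == target_branch)
def pvLoop1 (tb : String) : List (List (String × String)) → Option (List (String × String))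
  | [] => none
  | r :: rs =>
    if PySem.Str.upper ((pvLookup "branch" r).getD "") == tb then some r else pvLoop1 tb rs

-- second loop of A: find first rule with branch == 'default'
def pvLoop2 : List (List (String × String)) → Option (List (String × String))
  | [] => none
  | r :: rs =>
    if ((pvLookup "branch" r).getD "") == "default" then some r else pvLoop2 rs

def get_branch_rule_py (merged_config : List (String × List (List (String × String)))) (target_branch : String) : List (String × String) :=
  let branch_rules := (pvLookup "branch_rules" merged_config).getD []
  match pvLoop1 target_branch branch_rules with
  | some r => r
  | none =>
    match pvLoop2 branch_rules with
    | some r => r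
    | none => []

-- ===== PORT B =====
-- single pass: return on exact match, remember the first 'default' rule otherwise
def pvAltLoop (tb : String) : List (List (String × String)) → Option (List (String × String)) → List (String × String)
  | [], d => d.getD []
  | r :: rs, d =>
    let b := (pvLookup "branch" r).getD ""
    if PySem.Str.upper b == tb then r
    else if d.isNone && (b == "default") then pvAltLoop tb rs (some r)
    else pvAltLoop tb rs d

def get_branch_rule_py_alt (merged_config : List (String × List (List (String × String)))) (target_branch : String) : List (String × String) :=
  pvAltLoop target_branch ((pvLookup "branch_rules" merged_config).getD []) none

-- ===== PRECONDITION & SPEC =====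
-- Python A (and B) raises KeyError at the first rule lacking the 'branch' key, unless an
-- exact match is found before it; Pre_ admits exactly the inputs where no visited rule
-- lacks the key, i.e. every rule before the first exact match carries 'branch'.
def Pre_get_branch_rule_py (merged_config : List (String × List (List (String × String)))) (target_branch : String) : Prop :=
  ∀ r ∈ (((pvLookup "branch_rules" merged_config).getD []).takeWhile
      (fun r => !((pvLookup "branch" r).map (fun b => PySem.Str.upper b == target_branch)).getD false)),
    (pvLookup "branch" r).isSome = true
instance (merged_config : List (String × List (List (String × String)))) (target_branch : String) : Decidable (Pre_get_branch_rule_py merged_config target_branch) := by unfold Pre_get_branch_rule_py; infer_instance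

def pvWitness_get_branch_rule_py : (List (String × List (List (String × String)))) × String :=
  ([("branch_rules", [[("branch", "default"), ("strategy", "close")], [("branch", "main")]])], "MAIN")

def Spec_get_branch_rule_py (merged_config : List (String × List (List (String × String)))) (target_branch : String) (out : List (String × String)) : Prop := out = get_branch_rule_py_alt merged_config target_branch
instance (merged_config : List (String × List (List (String × String)))) (target_branch : String) (out : List (String × String)) : Decidable (Spec_get_branch_rule_py merged_config target_branch out) := by unfold Spec_get_branch_rule_py; infer_instance

-- ===== CLAIM (what is proved, stated in full; the proofs are below) =====
def Claim_equal_get_branch_rule_py : Prop := ∀ (merged_config : List (String × List (List (String × String)))) (target_branch : String), Dom_get_branch_rule_py merged_config target_branch → Pre_get_branch_rule_py merged_config target_branch → Spec_get_branch_rule_py merged_config target_branch (get_branch_rule_py merged_config target_branch)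

-- ===== LEMMAS AND PROOFS =====

-- one-pass loop with fallback accumulator = A's two sequential scans
theorem pvAltLoop_eq (tb : String) (rules : List (List (String × String))) (d : Option (List (String × String))) :
    pvAltLoop tb rules d =
      match pvLoop1 tb rules with
      | some r => r
      | none =>
        match d with
        | some r0 => r0
        | none => (pvLoop2 rules).getD [] := by
  induction rules generalizing d with
  | nil => cases d <;> simp [pvAltLoop, pvLoop1, pvLoop2]
  | cons r rs ih =>
    simp only [pvAltLoop, pvLoop1, pvLoop2]
    by_cases h1 : (PySem.Str.upper ((pvLookup "branch" r).getD "") == tb) = true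
    · simp [h1]
    · simp only [Bool.not_eq_true] at h1
      by_cases h2 : (((pvLookup "branch" r).getD "") == "default") = true
      · cases d with
        | none => simp [h1, h2, ih]
        | some r0 => simp [h1, h2, ih]
      · simp only [Bool.not_eq_true] at h2
        cases d with
        | none => simp [h1, h2, ih]
        | some r0 => simp [h1, h2, ih]

-- ===== VERDICT (by name: the statement is the Claim_ definition above) =====
theorem get_branch_rule_py_spec : Claim_equal_get_branch_rule_py := by
  intro mc tb _ _
  unfold Spec_get_branch_rule_py get_branch_rule_py get_branch_rule_py_alt
  rw [pvAltLoop_eq]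
  cases h1 : pvLoop1 tb ((pvLookup "branch_rules" mc).getD []) <;>
    cases h2 : pvLoop2 ((pvLookup "branch_rules" mc).getD []) <;> simp [h1, h2]
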